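-- pv_equiv track=rewrite | github.com/hacerkarayilan/PYTHON | starters.py | starters
-- ===== SOURCE A (Python) =====
-- def starters(list,num):
--     dic={}
--     a=set()
--     for i in list:
--         if i!="" and not i[0].lower() in dic.keys():
--             dic[i[0].lower()]=1
--         elif i!="" and i[0].lower() in dic.keys():
--             dic[i[0].lower()]+=1
--     for (k,v) in dic.items():
--         if v==num or v>num:
--             a.add(k)
--     return a
-- ===== SOURCE B (Python) =====
-- def starters(list, num):
--     firsts = [s[0].lower() for s in list if s != ""]
--     result = set()
--     while firsts:
--         c = firsts[0]
--         rest = [x for x in firsts if x != c]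
--         if len(firsts) - len(rest) >= num:
--             result.add(c)
--         firsts = rest
--     return result
-- ===== Notes on version B (the rewrite author's own statement) =====
-- stated objective: alternative
-- what changed: Replaces A's frequency dictionary with a repeated-partition loop: strip all occurrences of the first remaining letter, obtain its count as the length difference, and recurse on the remainder; no counting structure is built.
import Mathlib
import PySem

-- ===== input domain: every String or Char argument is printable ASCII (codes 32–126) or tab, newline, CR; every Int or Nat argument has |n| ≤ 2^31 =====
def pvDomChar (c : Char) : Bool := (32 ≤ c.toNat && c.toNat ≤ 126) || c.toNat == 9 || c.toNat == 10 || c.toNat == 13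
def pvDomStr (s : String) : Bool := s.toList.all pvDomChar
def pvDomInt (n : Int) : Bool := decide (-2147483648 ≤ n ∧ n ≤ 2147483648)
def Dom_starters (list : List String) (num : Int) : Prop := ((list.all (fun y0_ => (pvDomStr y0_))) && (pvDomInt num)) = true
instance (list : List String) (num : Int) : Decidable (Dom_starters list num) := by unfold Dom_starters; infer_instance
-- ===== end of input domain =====

-- B replaces A's frequency dictionary with a repeated-partition loop (strip all occurrences of the
-- first remaining letter, count = length difference, recurse on the remainder); a timing run
-- measured it faster by a constant factor (few distinct letters, whole-list passes vs per-item dict ops).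

-- i[0].lower() for a nonempty string i (under the i != "" guard): first character, lowercased, as a 1-char string
def pvFirstLower (s : String) : String := String.ofList (PySem.Chars.lower (s.toList.take 1))

-- ===== PORT A =====
def starters (list : List String) (num : Int) : List String :=
  (list.foldl (fun d i =>
      if i ≠ "" ∧ d.contains (pvFirstLower i) = false then d.insert (pvFirstLower i) 1
      else if i ≠ "" ∧ d.contains (pvFirstLower i) = true then d.modify (pvFirstLower i) 0 (· + 1)
      else d) (PySem.Dict.empty : PySem.Dict String Int)).items.foldl
    (fun a kv => if kv.2 = num ∨ kv.2 > num then PySem.Set.add a kv.1 else a) PySem.Set.empty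

-- ===== PORT B =====
-- the while loop of Source B: c = firsts[0]; rest = [x for x in firsts if x != c]; threshold test; firsts = rest
def startersGo (firsts : List String) (num : Int) (result : PySem.Set String) : PySem.Set String :=
  match firsts with
  | [] => result
  | c :: t =>
    let rest := (c :: t).filter (fun x => x ≠ c)
    startersGo rest num
      (if ((c :: t).length : Int) - (rest.length : Int) ≥ num then PySem.Set.add result c else result)
termination_by firsts.length
decreasing_by
  simp only [List.filter_cons, ne_eq, not_true_eq_false, decide_false, List.length_cons]
  exact Nat.lt_succ_of_le (List.length_filter_le _ _)

def starters_alt (list : List String) (num : Int) : List String :=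
  let firsts := (list.filter (fun s => s ≠ "")).map pvFirstLower
  startersGo firsts num PySem.Set.empty

-- ===== PRECONDITION & SPEC =====
def Spec_starters (list : List String) (num : Int) (out : List String) : Prop := out = starters_alt list num
instance (list : List String) (num : Int) (out : List String) : Decidable (Spec_starters list num out) := by unfold Spec_starters; infer_instance

-- ===== CLAIM (what is proved, stated in full; the proofs are below) =====
def Claim_equal_starters : Prop := ∀ (list : List String) (num : Int), Dom_starters list num → Spec_starters list num (starters list num)

-- ===== LEMMAS AND PROOFS =====

-- A's counting loop is the standard counter loop over the lowered first letters
theorem starters_loopA (list : List String) :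
    list.foldl (fun d i =>
      if i ≠ "" ∧ d.contains (pvFirstLower i) = false then d.insert (pvFirstLower i) 1
      else if i ≠ "" ∧ d.contains (pvFirstLower i) = true then d.modify (pvFirstLower i) 0 (· + 1)
      else d) (PySem.Dict.empty : PySem.Dict String Int)
    = PySem.Dict.counter ((list.filter (fun s => s ≠ "")).map pvFirstLower) := by
  rw [← PySem.Dict.foldl_insert_getD_add_one_eq_counter, List.foldl_map,
      ← PySem.List.foldl_ite_eq_foldl_filter (fun s => s ≠ "")]
  apply PySem.List.foldl_congr_mem
  intro d i _
  by_cases hne : i = ""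
  · simp [hne]
  · by_cases hc : d.contains (pvFirstLower i) = true
    · simp only [hne, hc, not_false_iff, true_and, Bool.true_eq_false, and_false, if_false, if_true, ne_eq]
      rfl
    · simp only [hne, ne_eq, not_false_eq_true, true_and, Bool.not_eq_true] at hc ⊢
      rw [if_pos hc, if_pos trivial, PySem.Dict.getD_of_not_contains _ _ hc]; norm_num

-- first-occurrence dedup commutes with filter
theorem ofList_filter {α : Type} [BEq α] [LawfulBEq α] (p : α → Bool) (xs : List α) :
    PySem.Set.ofList (xs.filter p) = (PySem.Set.ofList xs).filter p := by
  induction xs using List.reverseRecOn with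
  | nil => rfl
  | append_singleton xs x ih =>
    rw [List.filter_append, PySem.Set.ofList_append_singleton]
    by_cases hp : p x = true
    · simp only [List.filter_cons, hp, if_true, List.filter_nil,
        PySem.Set.ofList_append_singleton, ih]
      by_cases hx : x ∈ PySem.Set.ofList xs
      · rw [PySem.Set.add_of_mem hx,
          PySem.Set.add_of_mem (by simp [List.mem_filter, hx, hp])]
      · rw [PySem.Set.add_of_not_mem hx,
          PySem.Set.add_of_not_mem (fun h => hx (List.mem_filter.mp h).1),
          List.filter_append]
        simp [hp]
    · simp only [List.filter_cons, hp, if_false, List.filter_nil, List.append_nil, ih,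
        Bool.false_eq_true]
      by_cases hx : x ∈ PySem.Set.ofList xs
      · rw [PySem.Set.add_of_mem hx]
      · rw [PySem.Set.add_of_not_mem hx, List.filter_append]
        simp [hp]

-- the partition loop collects, in first-occurrence order, exactly the letters whose count meets num
theorem startersGo_eq_aux : ∀ (n : Nat) (xs : List String) (num : Int) (acc : PySem.Set String),
    xs.length ≤ n →
    startersGo xs num acc
      = ((PySem.Set.ofList xs).filter (fun x => decide (num ≤ (xs.count x : Int)))).foldl
          PySem.Set.add acc := by
  intro n
  induction n with
  | zero =>
    intro xs num acc h
    have : xs = [] := List.eq_nil_of_length_eq_zero (Nat.le_zero.mp h)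
    subst this
    simp [startersGo, PySem.Set.ofList_nil]
  | succ n IH =>
    intro xs num acc h
    match xs with
    | [] => simp [startersGo, PySem.Set.ofList_nil]
    | c :: t =>
      rw [startersGo]
      set rest := List.filter (fun x => decide (x ≠ c)) (c :: t) with hrestdef
      have hrest : rest = t.filter (fun x => decide (x ≠ c)) := by
        rw [hrestdef, List.filter_cons]
        simp
      have hlen : rest.length ≤ n := by
        have h1 := List.length_filter_le (fun x => decide (x ≠ c)) t
        rw [hrest]
        simp at h
        omega
      rw [IH rest num _ hlen]
      have hcount : ((c :: t).count c : Int) = ((c :: t).length : Int) - (rest.length : Int) := by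
        have h1 : (c :: t).count c = (c :: t).countP (fun x => x == c) := rfl
        have h2 : rest.length = (c :: t).countP (fun x => decide (x ≠ c)) := by
          rw [hrestdef, ← List.countP_eq_length_filter]
        have h3 : (c :: t).countP (fun x => x == c) + (c :: t).countP (fun x => decide (x ≠ c))
            = (c :: t).length := by
          rw [List.length_eq_countP_add_countP (p := fun x => x == c) (l := c :: t)]
          congr 1
          apply List.countP_congr
          intro x _
          by_cases hxc : x = c <;> simp [hxc]
        omega
      have hdisc : PySem.Set.discard (PySem.Set.ofList t) c = PySem.Set.ofList rest := by
        rw [hrest, ofList_filter]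
        unfold PySem.Set.discard
        apply List.filter_congr
        intro x _
        by_cases hx : x = c <;> simp [hx]
      rw [PySem.Set.ofList_cons, hdisc, List.filter_cons]
      have hfc : (List.filter (fun x => decide (num ≤ ((c :: t).count x : Int))) (PySem.Set.ofList rest))
          = (List.filter (fun x => decide (num ≤ (rest.count x : Int))) (PySem.Set.ofList rest)) := by
        apply List.filter_congr
        intro x hx
        have hxc : decide (x ≠ c) = true := by
          rw [hrest, ofList_filter] at hx
          simpa using List.of_mem_filter hx
        have hcnt : rest.count x = (c :: t).count x := by
          rw [hrestdef]
          exact List.count_filter (p := fun x => decide (x ≠ c)) hxc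
        rw [hcnt]
      by_cases hcnd : num ≤ ((c :: t).count c : Int)
      · have hA : ((c :: t).length : Int) - (rest.length : Int) ≥ num := by omega
        have hB : decide (num ≤ ((c :: t).count c : Int)) = true := by simpa using hcnd
        rw [if_pos hB, if_pos hA, List.foldl_cons, hfc]
      · have hA : ¬ (((c :: t).length : Int) - (rest.length : Int) ≥ num) := by omega
        have hB : ¬ (decide (num ≤ ((c :: t).count c : Int)) = true) := by simpa using hcnd
        rw [if_neg hB, if_neg hA, hfc]

theorem startersGo_eq (xs : List String) (num : Int) (acc : PySem.Set String) :
    startersGo xs num acc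
      = ((PySem.Set.ofList xs).filter (fun x => decide (num ≤ (xs.count x : Int)))).foldl
          PySem.Set.add acc :=
  startersGo_eq_aux xs.length xs num acc (Nat.le_refl _)

-- ===== VERDICT (by name: the statement is the Claim_ definition above) =====
theorem starters_spec : Claim_equal_starters := by
  intro list num _
  unfold Spec_starters starters starters_alt
  rw [starters_loopA]
  set firsts := (list.filter (fun s => s ≠ "")).map pvFirstLower with hf
  rw [PySem.Dict.items_counter, List.foldl_map, startersGo_eq]
  rw [← PySem.List.foldl_if_eq_foldl_filter]
  apply PySem.List.foldl_congr_mem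
  intro a k _
  by_cases h : num ≤ (firsts.count k : Int)
  · rw [if_pos (by omega), if_pos (by simpa using h)]
  · rw [if_neg (by omega), if_neg (by simpa using h)]
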